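-- pv_equiv track=rewrite | github.com/xiaojiangwu12338/Columbia_Capstone-KPMG | src/healthcare_rag_llm/chunking/semantic_chunking.py | _enforce_char_limit
-- ===== SOURCE A (Python) =====
-- from typing import List, Dict, Optional, Tuple
--
-- def _enforce_char_limit(
--     chunks_by_units: "List[List[Tuple[int, int]]]",
--     max_chunk_chars: int,
-- ) -> "List[List[Tuple[int, int]]]":
--     """
--     For any chunk whose char span exceeds max_chunk_chars, split it into sub-chunks
--     at unit boundaries (no overlap).
--     """
--     finalized: List[List[Tuple[int, int]]] = []
--     for chunk_units in chunks_by_units: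
--         if (chunk_units[-1][1] - chunk_units[0][0]) <= max_chunk_chars:
--             finalized.append(chunk_units)
--             continue
--
--         current: List[Tuple[int, int]] = []
--         current_start = None
--         for span in chunk_units:
--             if not current:
--                 current = [span]
--                 current_start = span[0]
--             else:
--                 if (span[1] - current_start) <= max_chunk_chars:
--                     current.append(span)
--                 else:
--                     finalized.append(current)
--                     current = [span]
--                     current_start = span[0]
--
--         if current:
--             finalized.append(current)
--
--     return finalized
-- ===== SOURCE B (Python) =====
-- from typing import List, Tuple
--
-- def _enforce_char_limit(
--     chunks_by_units: "List[List[Tuple[int, int]]]",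
--     max_chunk_chars: int,
-- ) -> "List[List[Tuple[int, int]]]":
--     """
--     Two-phase variant: for an oversized chunk, first compute the list of cut
--     indices in one scan, then emit the sub-chunks by slicing between
--     consecutive cuts.
--     """
--     finalized: List[List[Tuple[int, int]]] = []
--     for chunk_units in chunks_by_units:
--         if chunk_units[-1][1] - chunk_units[0][0] <= max_chunk_chars:
--             finalized.append(chunk_units)
--             continue
--         cuts = [0]
--         current_start = chunk_units[0][0]
--         for i, span in enumerate(chunk_units):
--             if i > 0 and span[1] - current_start > max_chunk_chars:
--                 cuts.append(i)
--                 current_start = span[0]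
--         cuts.append(len(chunk_units))
--         finalized.extend(chunk_units[a:b] for a, b in zip(cuts, cuts[1:]))
--     return finalized
-- ===== Notes on version B (the rewrite author's own statement) =====
-- stated objective: alternative
-- what changed: B replaces A's append-as-you-go accumulator (mutable current list + current_start threaded through the loop) by a two-phase pass per oversized chunk: one scan computes the list of cut indices, then the sub-chunks are produced by slicing the chunk between consecutive cuts.
import Mathlib
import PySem

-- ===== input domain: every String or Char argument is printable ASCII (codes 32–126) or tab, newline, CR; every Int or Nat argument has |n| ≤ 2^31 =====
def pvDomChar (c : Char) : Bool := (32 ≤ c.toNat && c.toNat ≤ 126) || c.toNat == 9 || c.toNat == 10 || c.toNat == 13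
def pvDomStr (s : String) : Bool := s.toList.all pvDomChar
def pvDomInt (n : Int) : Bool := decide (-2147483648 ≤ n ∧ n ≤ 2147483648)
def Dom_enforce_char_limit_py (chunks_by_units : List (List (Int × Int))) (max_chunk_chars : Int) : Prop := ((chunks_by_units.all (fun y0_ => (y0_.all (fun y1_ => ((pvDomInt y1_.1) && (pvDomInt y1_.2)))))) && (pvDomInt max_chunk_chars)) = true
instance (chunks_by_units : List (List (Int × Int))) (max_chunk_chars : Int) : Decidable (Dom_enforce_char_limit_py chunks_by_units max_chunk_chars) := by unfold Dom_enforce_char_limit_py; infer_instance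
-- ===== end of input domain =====

-- B computes per-chunk cut indices in one scan and then slices between consecutive cuts,
-- instead of A's append-as-you-go accumulator; same cost, different decomposition.

-- ===== PORT A =====
-- inner loop body of A: state = (finalized, current, current_start)
def stepA (m : Int) (st : List (List (Int × Int)) × List (Int × Int) × Option Int)
    (span : Int × Int) : List (List (Int × Int)) × List (Int × Int) × Option Int :=
  if st.2.1.isEmpty then (st.1, [span], some span.1)
  else
    match st.2.2 with
    | some cs =>
        if span.2 - cs ≤ m then (st.1, st.2.1 ++ [span], some cs)
        else (st.1 ++ [st.2.1], [span], some span.1)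
    | none => (st.1, st.2.1 ++ [span], none)   -- unreachable: current nonempty ⟹ current_start set

-- body of A's outer loop over chunks_by_units
def procA (m : Int) (finalized : List (List (Int × Int))) (chunk_units : List (Int × Int)) :
    List (List (Int × Int)) :=
  match PySem.List.pyGet? chunk_units (-1), PySem.List.pyGet? chunk_units 0 with
  | some lastSpan, some firstSpan =>
      if lastSpan.2 - firstSpan.1 ≤ m then finalized ++ [chunk_units]
      else
        let st := chunk_units.foldl (stepA m) (finalized, ([], none))
        if st.2.1.isEmpty then st.1 else st.1 ++ [st.2.1]
  | _, _ => finalized   -- IndexError on an empty chunk: excluded by Pre_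

def enforce_char_limit_py (chunks_by_units : List (List (Int × Int))) (max_chunk_chars : Int) :
    List (List (Int × Int)) :=
  chunks_by_units.foldl (procA max_chunk_chars) []

-- ===== PORT B =====
-- cut-scan loop body of B: state = (cuts, current_start); p = (index, span) from enumerate
def stepB (m : Int) (st : List Int × Int) (p : Int × (Int × Int)) : List Int × Int :=
  if 0 < p.1 ∧ p.2.2 - st.2 > m then (st.1 ++ [p.1], p.2.1) else st

-- body of B's outer loop over chunks_by_units
def procB (m : Int) (finalized : List (List (Int × Int))) (chunk_units : List (Int × Int)) :
    List (List (Int × Int)) :=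
  match PySem.List.pyGet? chunk_units (-1), PySem.List.pyGet? chunk_units 0 with
  | some lastSpan, some firstSpan =>
      if lastSpan.2 - firstSpan.1 ≤ m then finalized ++ [chunk_units]
      else
        let st := (PySem.List.enumerate chunk_units 0).foldl (stepB m) ([0], firstSpan.1)
        let cuts := st.1 ++ [(chunk_units.length : Int)]
        finalized ++ (cuts.zip cuts.tail).map
          (fun ab => PySem.List.slice chunk_units (some ab.1) (some ab.2))
  | _, _ => finalized   -- IndexError on an empty chunk: excluded by Pre_

def enforce_char_limit_py_alt (chunks_by_units : List (List (Int × Int))) (max_chunk_chars : Int) :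
    List (List (Int × Int)) :=
  chunks_by_units.foldl (procB max_chunk_chars) []

-- ===== PRECONDITION & SPEC =====
-- Pre_ excludes inputs containing an empty chunk, on which Python A (chunk_units[-1]) raises IndexError.
def Pre_enforce_char_limit_py (chunks_by_units : List (List (Int × Int))) (max_chunk_chars : Int) : Prop :=
  ∀ c ∈ chunks_by_units, c ≠ []
instance (chunks_by_units : List (List (Int × Int))) (max_chunk_chars : Int) : Decidable (Pre_enforce_char_limit_py chunks_by_units max_chunk_chars) := by unfold Pre_enforce_char_limit_py; infer_instance
def pvWitness_enforce_char_limit_py : (List (List (Int × Int))) × Int := ([[(0, 3), (3, 7)]], 5)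

def Spec_enforce_char_limit_py (chunks_by_units : List (List (Int × Int))) (max_chunk_chars : Int) (out : List (List (Int × Int))) : Prop := out = enforce_char_limit_py_alt chunks_by_units max_chunk_chars
instance (chunks_by_units : List (List (Int × Int))) (max_chunk_chars : Int) (out : List (List (Int × Int))) : Decidable (Spec_enforce_char_limit_py chunks_by_units max_chunk_chars out) := by unfold Spec_enforce_char_limit_py; infer_instance

-- ===== CLAIM (what is proved, stated in full; the proofs are below) =====
def Claim_equal_enforce_char_limit_py : Prop := ∀ (chunks_by_units : List (List (Int × Int))) (max_chunk_chars : Int), Dom_enforce_char_limit_py chunks_by_units max_chunk_chars → Pre_enforce_char_limit_py chunks_by_units max_chunk_chars → Spec_enforce_char_limit_py chunks_by_units max_chunk_chars (enforce_char_limit_py chunks_by_units max_chunk_chars)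

-- ===== LEMMAS AND PROOFS =====

-- reference greedy grouping: go m cs cur rest = the groups produced from state (cur, cs) over rest
def go (m cs : Int) (cur : List (Int × Int)) : List (Int × Int) → List (List (Int × Int))
  | [] => [cur]
  | s :: rest => if s.2 - cs ≤ m then go m cs (cur ++ [s]) rest else cur :: go m s.1 [s] rest

-- recursive form of B's cut scan
def cutsF (m cs : Int) : List (Int × (Int × Int)) → List Int
  | [] => []
  | p :: l => if 0 < p.1 ∧ p.2.2 - cs > m then p.1 :: cutsF m p.2.1 l else cutsF m cs l

-- slices of chunk between consecutive entries of cuts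
def sliceParts (chunk : List (Int × Int)) (cuts : List Int) : List (List (Int × Int)) :=
  (cuts.zip cuts.tail).map (fun ab => PySem.List.slice chunk (some ab.1) (some ab.2))

theorem innerA_eq_go (m : Int) (rest : List (Int × Int)) :
    ∀ (fin : List (List (Int × Int))) (cur : List (Int × Int)) (cs : Int), cur ≠ [] →
    (let st := rest.foldl (stepA m) (fin, (cur, some cs));
      if st.2.1.isEmpty then st.1 else st.1 ++ [st.2.1]) = fin ++ go m cs cur rest := by
  induction rest with
  | nil =>
      intro fin cur cs hcur
      simp [go, List.isEmpty_iff, hcur]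
  | cons s rest ih =>
      intro fin cur cs hcur
      simp only [List.foldl_cons]
      have hA : stepA m (fin, (cur, some cs)) s =
          if s.2 - cs ≤ m then (fin, (cur ++ [s], some cs)) else (fin ++ [cur], ([s], some s.1)) := by
        simp [stepA, List.isEmpty_iff, hcur]
      by_cases h : s.2 - cs ≤ m
      · rw [hA]; simp only [if_pos h]
        rw [ih fin (cur ++ [s]) cs (by simp)]
        simp [go, h]
      · rw [hA]; simp only [if_neg h]
        rw [ih (fin ++ [cur]) [s] s.1 (by simp)]
        simp [go, h]

theorem foldB_cuts (m : Int) (l : List (Int × (Int × Int))) :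
    ∀ (pre : List Int) (cs : Int),
    (l.foldl (stepB m) (pre, cs)).1 = pre ++ cutsF m cs l := by
  induction l with
  | nil => intro pre cs; simp [cutsF]
  | cons p l ih =>
      intro pre cs
      simp only [List.foldl_cons, stepB, cutsF]
      by_cases h : 0 < p.1 ∧ p.2.2 - cs > m
      · simp only [if_pos h]; rw [ih]; simp
      · simp only [if_neg h]; rw [ih]

theorem sliceParts_cons (chunk : List (Int × Int)) (a b : Int) (t : List Int) :
    sliceParts chunk (a :: b :: t) =
      PySem.List.slice chunk (some a) (some b) :: sliceParts chunk (b :: t) := by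
  simp [sliceParts]

theorem bridge (m : Int) (chunk : List (Int × Int)) (rest : List (Int × Int)) :
    ∀ (c i : Nat) (cs : Int), c < i → chunk.drop i = rest →
    sliceParts chunk (((c : Int) :: cutsF m cs (PySem.List.enumerate rest (i : Int))) ++ [(chunk.length : Int)])
      = go m cs ((chunk.drop c).take (i - c)) rest := by
  induction rest with
  | nil =>
      intro c i cs hci hdrop
      have hlen : chunk.length ≤ i := List.drop_eq_nil_iff.mp hdrop
      have h1 : (chunk.drop c).length ≤ chunk.length - c := by simp
      rw [PySem.List.enumerate_nil]
      simp only [cutsF, List.nil_append, List.cons_append, List.nil_append]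
      rw [sliceParts_cons]
      simp only [sliceParts, List.tail, List.zip_nil_right, List.map_nil, go]
      rw [PySem.List.slice_natCast]
      congr 1
      rw [List.take_of_length_le (by omega), List.take_of_length_le (by omega)]
  | cons s rest ih =>
      intro c i cs hci hdrop
      have hi : i < chunk.length := by
        by_contra h
        rw [List.drop_eq_nil_iff.mpr (by omega)] at hdrop
        exact List.cons_ne_nil _ _ hdrop.symm
      have hs : chunk[i]'hi = s := by
        have h0 : (chunk.drop i)[0]'(by rw [hdrop]; simp) = s := by simp [hdrop]
        simpa using h0
      have hdrop' : chunk.drop (i + 1) = rest := by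
        have h := List.drop_drop (l := chunk) (i := 1) (j := i)
        rw [hdrop] at h
        simpa [Nat.add_comm] using h.symm
      rw [PySem.List.enumerate_cons]
      simp only [cutsF]
      by_cases h : 0 < ((i : Nat) : Int) ∧ s.2 - cs > m
      · simp only [if_pos h, List.cons_append]
        rw [sliceParts_cons]
        have hcast : ((i : Nat) : Int) + 1 = ((i + 1 : Nat) : Int) := by push_cast; ring
        rw [hcast]
        simp only [← List.cons_append]
        rw [ih i (i + 1) s.1 (by omega) hdrop']
        have hseg1 : (chunk.drop i).take (i + 1 - i) = [s] := by
          rw [hdrop]; simp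
        rw [hseg1]
        have hgo : go m cs ((chunk.drop c).take (i - c)) (s :: rest) =
            (chunk.drop c).take (i - c) :: go m s.1 [s] rest := by
          simp [go, show ¬ s.2 - cs ≤ m by omega]
        rw [hgo]
        congr 1
        rw [PySem.List.slice_natCast]
      · have hpos : (0 : Int) < ((i : Nat) : Int) := by exact_mod_cast Nat.zero_lt_of_lt hci
        have hle : s.2 - cs ≤ m := by
          by_contra hc; exact h ⟨hpos, by omega⟩
        simp only [if_neg h]
        have hcast : ((i : Nat) : Int) + 1 = ((i + 1 : Nat) : Int) := by push_cast; ring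
        rw [hcast, ih c (i + 1) cs (by omega) hdrop']
        have hseg : (chunk.drop c).take (i + 1 - c) = (chunk.drop c).take (i - c) ++ [s] := by
          have h1 : i + 1 - c = (i - c) + 1 := by omega
          have h2 : i - c < (chunk.drop c).length := by simp; omega
          have h3 : (List.drop c chunk)[i - c]'h2 = s := by
            simp only [List.getElem_drop]
            have hidx : c + (i - c) = i := by omega
            simp only [hidx]
            exact hs
          rw [h1, List.take_add_one, List.getElem?_eq_getElem h2, h3]
          rfl
        rw [hseg] at *
        simp [go, hle]

theorem proc_eq (m : Int) (fin : List (List (Int × Int))) (chunk : List (Int × Int)) :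
    procA m fin chunk = procB m fin chunk := by
  cases chunk with
  | nil => simp [procA, procB, PySem.List.pyGet?]
  | cons s0 rest0 =>
      have hget0 : PySem.List.pyGet? (s0 :: rest0) 0 = some s0 :=
        PySem.List.pyGet?_zero_cons s0 rest0
      have ht : PySem.List.pyGet? (s0 :: rest0) (-1) =
          some ((s0 :: rest0).getLast (by simp)) := by
        rw [PySem.List.pyGet?_neg_one]
        exact List.getLast?_eq_some_getLast (by simp)
      simp only [procA, procB, ht, hget0]
      by_cases hfit : ((s0 :: rest0).getLast (by simp)).2 - s0.1 ≤ m
      · simp [hfit]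
      · simp only [if_neg hfit]
        -- A side
        have hA : (let st := (s0 :: rest0).foldl (stepA m) (fin, ([], none));
            if st.2.1.isEmpty then st.1 else st.1 ++ [st.2.1]) = fin ++ go m s0.1 [s0] rest0 := by
          simp only [List.foldl_cons]
          have h1 : stepA m (fin, ([], none)) s0 = (fin, ([s0], some s0.1)) := by
            simp [stepA]
          rw [h1]
          exact innerA_eq_go m rest0 fin [s0] s0.1 (by simp)
        -- B side
        have hB0 : PySem.List.enumerate (s0 :: rest0) (0 : Int) =
            (0, s0) :: PySem.List.enumerate rest0 1 := by
          rw [PySem.List.enumerate_cons]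
          norm_num
        have hstep0 : stepB m ([0], s0.1) (0, s0) = ([0], s0.1) := by simp [stepB]
        have hcuts : ((PySem.List.enumerate (s0 :: rest0) (0 : Int)).foldl (stepB m) ([0], s0.1)).1
            = (0 : Int) :: cutsF m s0.1 (PySem.List.enumerate rest0 1) := by
          rw [hB0]
          simp only [List.foldl_cons, hstep0]
          rw [foldB_cuts]
          rfl
        have hbr := bridge m (s0 :: rest0) rest0 0 1 s0.1 (by omega) (by simp)
        simp only [Nat.cast_zero, Nat.cast_one, List.drop_zero, Nat.sub_zero,
          List.take_succ_cons, List.take_zero] at hbr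
        rw [hA]
        show fin ++ go m s0.1 [s0] rest0 = fin ++ sliceParts (s0 :: rest0)
          ((((PySem.List.enumerate (s0 :: rest0) (0 : Int)).foldl (stepB m) ([0], s0.1)).1)
            ++ [((s0 :: rest0).length : Int)])
        rw [hcuts]
        rw [show ((0 : Int) :: cutsF m s0.1 (PySem.List.enumerate rest0 1)) ++ [((s0 :: rest0).length : Int)]
            = ((0 : Int) :: cutsF m s0.1 (PySem.List.enumerate rest0 1) ++ [((s0 :: rest0).length : Int)]) from by simp]
        rw [hbr]

-- ===== VERDICT (by name: the statement is the Claim_ definition above) =====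
theorem enforce_char_limit_py_spec : Claim_equal_enforce_char_limit_py := by
  intro chunks m _ _
  unfold Spec_enforce_char_limit_py enforce_char_limit_py enforce_char_limit_py_alt
  have h : procA m = procB m := funext fun fin => funext fun c => proc_eq m fin c
  rw [h]
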